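-- pv_equiv track=rewrite | github.com/jgs1202/scalableGIB | analyze/py/unit_segmentation_for_AOImove.py | count_AOIs_in_a_time_window
-- ===== SOURCE A (Python) =====
-- def count_AOIs_in_a_time_window(data, index, direction, time_window):
--     # direction is 1 or -1
--     # saccadeはAOIととらえない　AOIの変化のみ記録
--     count = 0
--     try:
--         old_AOI = data[index]['AOI']
--     except:
--         old_AOI = None
--     for step in range(time_window):
--         position = index + step * direction
--         if position >= 0 and position < len(data):
--             try:
--                 if old_AOI != data[position]['AOI']:
--                     old_AOI = data[position]['AOI']
--                     count += 1
--             except: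
--                 pass
--         else:
--             break
--     return count
-- ===== SOURCE B (Python) =====
-- def count_AOIs_in_a_time_window(data, index, direction, time_window):
--     # Closed-form window length (no break inside the loop), then a staged
--     # collect-and-count: gather observed AOI values, count adjacent changes.
--     n = len(data)
--     if time_window <= 0 or not (0 <= index < n):
--         steps = 0
--     elif direction == 0:
--         steps = time_window
--     elif direction > 0:
--         steps = min(time_window, (n - 1 - index) // direction + 1)
--     else:
--         steps = min(time_window, index // (-direction) + 1)
--     try:
--         head = data[index]['AOI']
--     except:
--         head = None
--     seq = [head] + [row['AOI']
--                     for row in (data[index + step * direction] for step in range(steps))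
--                     if 'AOI' in row]
--     return sum(a != b for a, b in zip(seq, seq[1:]))
-- ===== Notes on version B (the rewrite author's own statement) =====
-- stated objective: alternative
-- what changed: B replaces A's compare-as-you-go loop with a break by a closed-form computation of the window length (floor-division on the first out-of-range step), then a staged collect-and-count: a comprehension gathers the observed AOI values over range(steps) and a zip pass counts adjacent changes.
import Mathlib
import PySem

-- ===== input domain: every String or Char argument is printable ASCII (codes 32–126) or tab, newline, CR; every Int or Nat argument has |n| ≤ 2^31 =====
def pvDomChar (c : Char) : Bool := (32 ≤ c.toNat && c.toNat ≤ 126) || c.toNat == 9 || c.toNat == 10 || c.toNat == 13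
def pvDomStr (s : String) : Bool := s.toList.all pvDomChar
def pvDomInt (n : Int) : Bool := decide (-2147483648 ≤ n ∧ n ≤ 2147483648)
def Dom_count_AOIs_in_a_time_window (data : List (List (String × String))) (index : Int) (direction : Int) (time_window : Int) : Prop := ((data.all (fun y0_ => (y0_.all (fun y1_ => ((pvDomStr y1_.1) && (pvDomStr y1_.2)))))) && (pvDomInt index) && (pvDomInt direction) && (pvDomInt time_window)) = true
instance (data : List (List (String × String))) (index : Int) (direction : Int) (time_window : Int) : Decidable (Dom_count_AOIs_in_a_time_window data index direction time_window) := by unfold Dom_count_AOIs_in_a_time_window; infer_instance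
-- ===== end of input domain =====

-- B computes the window length in closed form (floor division instead of A's break),
-- collects the observed AOI values over that range, and counts adjacent changes in a
-- separate zip pass (objective: alternative).

-- ===== PORT A =====

-- dict lookup row['AOI'] (first match; none = KeyError, caught by A's try)
def pvAOI (row : List (String × String)) : Option String :=
  (row.find? (fun kv => kv.1 == "AOI")).map (·.2)

-- A's 'for step in range(time_window)' loop with its break and running counter
def pvLoopA (data : List (List (String × String))) (index direction : Int) :
    Nat → Int → Option String → Int → Int
  | 0, _, _, count => count
  | fuel + 1, step, old, count =>
    let position := index + step * direction
    if 0 ≤ position ∧ position < (data.length : Int) then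
      match PySem.List.pyGet? data position with
      | none => pvLoopA data index direction fuel (step + 1) old count  -- unreachable: position in range
      | some row =>
        match pvAOI row with
        | none => pvLoopA data index direction fuel (step + 1) old count  -- KeyError: except: pass
        | some v =>
          if old ≠ some v then
            pvLoopA data index direction fuel (step + 1) (some v) (count + 1)
          else
            pvLoopA data index direction fuel (step + 1) old count
    else count

def count_AOIs_in_a_time_window (data : List (List (String × String))) (index : Int) (direction : Int) (time_window : Int) : Int :=
  let old_AOI : Option String := (PySem.List.pyGet? data index).bind pvAOI
  pvLoopA data index direction time_window.toNat 0 old_AOI 0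

-- ===== PORT B =====

-- closed-form number of loop iterations before the first out-of-range position
def pvSteps (n index direction time_window : Int) : Int :=
  if time_window ≤ 0 ∨ ¬ (0 ≤ index ∧ index < n) then 0
  else if direction = 0 then time_window
  else if 0 < direction then
    min time_window (PySem.Int.floordiv (n - 1 - index) direction + 1)
  else
    min time_window (PySem.Int.floordiv index (-direction) + 1)

-- row['AOI'] via the Dict view (some = present, none skipped by the comprehension filter)
def pvGetAOI (row : List (String × String)) : Option String :=
  (PySem.Dict.mk row).get? "AOI"

def count_AOIs_in_a_time_window_alt (data : List (List (String × String))) (index : Int) (direction : Int) (time_window : Int) : Int :=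
  let head : Option String := (PySem.List.pyGet? data index).bind pvGetAOI
  let steps := pvSteps (data.length : Int) index direction time_window
  let seq : List (Option String) :=
    head :: ((PySem.List.pyRange 0 steps 1).filterMap
               (fun step => ((PySem.List.pyGet? data (index + step * direction)).bind pvGetAOI).map some))
  ((seq.zip seq.tail).countP (fun p => p.1 ≠ p.2) : Int)

-- ===== PRECONDITION & SPEC =====
def Spec_count_AOIs_in_a_time_window (data : List (List (String × String))) (index : Int) (direction : Int) (time_window : Int) (out : Int) : Prop := out = count_AOIs_in_a_time_window_alt data index direction time_window
instance (data : List (List (String × String))) (index : Int) (direction : Int) (time_window : Int) (out : Int) : Decidable (Spec_count_AOIs_in_a_time_window data index direction time_window out) := by unfold Spec_count_AOIs_in_a_time_window; infer_instance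

-- ===== CLAIM (what is proved, stated in full; the proofs are below) =====
def Claim_equal_count_AOIs_in_a_time_window : Prop := ∀ (data : List (List (String × String))) (index : Int) (direction : Int) (time_window : Int), Dom_count_AOIs_in_a_time_window data index direction time_window → Spec_count_AOIs_in_a_time_window data index direction time_window (count_AOIs_in_a_time_window data index direction time_window)

-- ===== LEMMAS AND PROOFS =====

-- pvGetAOI (Dict-based, B) and pvAOI (find?-based, A) are the same lookup
theorem pvGetAOI_eq (row : List (String × String)) : pvGetAOI row = pvAOI row := by
  unfold pvGetAOI pvAOI
  induction row with
  | nil => rfl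
  | cons kv rest ih =>
    rw [PySem.Dict.get?_mk_cons, List.find?]
    by_cases h : kv.1 == "AOI"
    · simp [h]
    · simp only [h, if_false, Bool.false_eq_true, ih]

-- proof-only: the sequence of AOI values A's loop observes (fuel/step recursion)
def pvCollect (data : List (List (String × String))) (index direction : Int) :
    Nat → Int → List (Option String)
  | 0, _ => []
  | fuel + 1, step =>
    let position := index + step * direction
    if 0 ≤ position ∧ position < (data.length : Int) then
      match PySem.List.pyGet? data position with
      | none => pvCollect data index direction fuel (step + 1)
      | some row =>
        match pvAOI row with
        | none => pvCollect data index direction fuel (step + 1)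
        | some v => some v :: pvCollect data index direction fuel (step + 1)
    else []

-- proof-only: adjacent-transition count, recursive form
def pvCountAdj : List (Option String) → Int
  | a :: b :: rest => (if a ≠ b then 1 else 0) + pvCountAdj (b :: rest)
  | _ => 0

theorem pvLoopA_eq_countAdj (data : List (List (String × String))) (index direction : Int) :
    ∀ (fuel : Nat) (step : Int) (old : Option String) (count : Int),
      pvLoopA data index direction fuel step old count
        = count + pvCountAdj (old :: pvCollect data index direction fuel step) := by
  intro fuel
  induction fuel with
  | zero => intro step old count; simp [pvLoopA, pvCollect, pvCountAdj]
  | succ f ih =>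
    intro step old count
    simp only [pvLoopA, pvCollect]
    split
    · cases h : PySem.List.pyGet? data (index + step * direction) with
      | none => simpa using ih (step + 1) old count
      | some row =>
        cases hA : pvAOI row with
        | none => simp only [hA]; simpa using ih (step + 1) old count
        | some v =>
          simp only [hA]
          by_cases hov : old = some v
          · simp only [hov, pvCountAdj, if_neg (by simp : ¬ (some v : Option String) ≠ some v)]
            simpa using ih (step + 1) (some v) count
          · simp only [pvCountAdj, if_pos (hov : old ≠ some v)]
            rw [ih (step + 1) (some v) (count + 1)]
            ring
    · simp [pvCountAdj]

-- recursive adjacent count = B's zip/countP pass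
theorem pvCountAdj_eq_zip (seq : List (Option String)) :
    pvCountAdj seq = ((seq.zip seq.tail).countP (fun p => p.1 ≠ p.2) : Int) := by
  induction seq with
  | nil => simp [pvCountAdj]
  | cons a rest ih =>
    cases rest with
    | nil => simp [pvCountAdj]
    | cons b r =>
      simp only [pvCountAdj, List.tail_cons, List.zip_cons_cons, List.countP_cons, ih]
      by_cases h : a = b
      · simp [h]
      · simp [h]; omega

-- all steps strictly before pvSteps are in range
theorem pvSteps_in_range (n index direction time_window j : Int)
    (h0 : 0 ≤ j) (hj : j < pvSteps n index direction time_window) :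
    0 ≤ index + j * direction ∧ index + j * direction < n := by
  unfold pvSteps at hj
  split at hj
  · omega
  · rename_i hin
    push Not at hin
    split at hj
    · rename_i hd; subst hd; simp at hin ⊢; omega
    · split at hj
      · rename_i _ hd
        rw [PySem.Int.floordiv_eq_ediv_of_pos hd] at hj
        have hle : j ≤ (n - 1 - index) / direction := by omega
        have := Int.le_ediv_iff_mul_le hd |>.mp hle
        constructor
        · nlinarith
        · omega
      · rename_i _ hd
        have hd' : 0 < -direction := by omega
        rw [PySem.Int.floordiv_eq_ediv_of_pos hd'] at hj
        have hle : j ≤ index / (-direction) := by omega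
        have := Int.le_ediv_iff_mul_le hd' |>.mp hle
        constructor
        · nlinarith
        · nlinarith

-- if the loop is not exhausted, step pvSteps itself is out of range
theorem pvSteps_stop (n index direction time_window : Int)
    (h : pvSteps n index direction time_window < time_window) :
    ¬ (0 ≤ index + pvSteps n index direction time_window * direction ∧
       index + pvSteps n index direction time_window * direction < n) := by
  unfold pvSteps at h ⊢
  split
  · rename_i hcase
    rcases hcase with htw | hin
    · omega
    · push Not at hin; simp; omega
  · rename_i hcase
    push Not at hcase
    split
    · omega
    · split
      · rename_i _ hd
        rw [PySem.Int.floordiv_eq_ediv_of_pos hd] at h ⊢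
        set q := (n - 1 - index) / direction with hq
        have hqmin : min time_window (q + 1) = q + 1 := by omega
        rw [hqmin]
        have := Int.lt_ediv_add_one_mul_self (n - 1 - index) hd
        rw [← hq] at this
        intro ⟨_, hlt⟩
        nlinarith
      · rename_i _ hd
        have hd' : 0 < -direction := by omega
        rw [PySem.Int.floordiv_eq_ediv_of_pos hd'] at h ⊢
        set q := index / (-direction) with hq
        have hqmin : min time_window (q + 1) = q + 1 := by omega
        rw [hqmin]
        have := Int.lt_ediv_add_one_mul_self index hd'
        rw [← hq] at this
        intro ⟨hge, _⟩
        nlinarith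

theorem pvSteps_nonneg (n index direction time_window : Int) :
    0 ≤ pvSteps n index direction time_window := by
  unfold pvSteps
  split
  · omega
  · rename_i hcase
    push Not at hcase
    split
    · omega
    · split
      · rename_i _ hd
        rw [PySem.Int.floordiv_eq_ediv_of_pos hd]
        have : 0 ≤ (n - 1 - index) / direction := Int.ediv_nonneg (by omega) (by omega)
        omega
      · rename_i _ hd
        have hd' : 0 < -direction := by omega
        rw [PySem.Int.floordiv_eq_ediv_of_pos hd']
        have : 0 ≤ index / (-direction) := Int.ediv_nonneg (by omega) (by omega)
        omega

theorem pvSteps_le (n index direction time_window : Int) (htw : 0 ≤ time_window) :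
    pvSteps n index direction time_window ≤ time_window := by
  unfold pvSteps
  split
  · omega
  · split
    · omega
    · split <;> omega

-- the collector equals B's filterMap over the closed-form range
theorem pvCollect_eq_filterMap (data : List (List (String × String))) (index direction : Int)
    (S T : Int)
    (hmono : ∀ j, 0 ≤ j → j < S → 0 ≤ index + j * direction ∧ index + j * direction < (data.length : Int))
    (hstop : S < T → ¬ (0 ≤ index + S * direction ∧ index + S * direction < (data.length : Int)))
    (hST : S ≤ T) :
    ∀ (fuel : Nat) (step : Int), 0 ≤ step → step ≤ S → step + (fuel : Int) = T →
      pvCollect data index direction fuel step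
        = (PySem.List.pyRange step S 1).filterMap
            (fun j => ((PySem.List.pyGet? data (index + j * direction)).bind pvAOI).map some) := by
  intro fuel
  induction fuel with
  | zero =>
    intro step h0 hle hT
    have : step = S := by omega
    simp [pvCollect, this, PySem.List.pyRange_one_eq_nil (le_refl S)]
  | succ f ih =>
    intro step h0 hle hT
    simp only [pvCollect]
    by_cases hlt : step < S
    · have hin := hmono step h0 hlt
      rw [if_pos hin, PySem.List.pyRange_one_cons hlt, List.filterMap_cons]
      have hrec := ih (step + 1) (by omega) (by omega) (by push_cast at hT ⊢; omega)
      cases h : PySem.List.pyGet? data (index + step * direction) with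
      | none => simpa [h] using hrec
      | some row =>
        cases hA : pvAOI row with
        | none => simp only [hA, Option.bind_some, Option.map_none]; exact hrec
        | some v => simp only [hA, Option.bind_some, Option.map_some, hrec]
    · have hstep : step = S := by omega
      subst hstep
      rw [if_neg (hstop (by push_cast at hT; omega)),
          PySem.List.pyRange_one_eq_nil (le_refl step), List.filterMap_nil]

-- ===== VERDICT (by name: the statement is the Claim_ definition above) =====
theorem count_AOIs_in_a_time_window_spec : Claim_equal_count_AOIs_in_a_time_window := by
  intro data index direction time_window _
  unfold Spec_count_AOIs_in_a_time_window count_AOIs_in_a_time_window count_AOIs_in_a_time_window_alt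
  have hfg : pvGetAOI = pvAOI := funext pvGetAOI_eq
  rw [hfg, pvLoopA_eq_countAdj, pvCountAdj_eq_zip]
  by_cases htw : 0 ≤ time_window
  · rw [pvCollect_eq_filterMap data index direction
        (pvSteps (data.length : Int) index direction time_window) time_window
        (fun j h0 hj => pvSteps_in_range _ _ _ _ j h0 hj)
        (fun hlt => pvSteps_stop _ _ _ _ hlt)
        (pvSteps_le _ _ _ _ htw)
        time_window.toNat 0 (le_refl 0)
        (pvSteps_nonneg _ _ _ _) (by simp [Int.toNat_of_nonneg htw])]
    ring
  · have h0 : time_window.toNat = 0 := by omega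
    have hS : pvSteps (data.length : Int) index direction time_window = 0 := by
      unfold pvSteps; rw [if_pos (Or.inl (by omega))]
    rw [h0, hS]
    simp [pvCollect, PySem.List.pyRange_one_eq_nil (le_refl (0:Int))]
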